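-- pv_equiv track=rewrite | github.com/JamieAJDay1999/Data_Centre | flexibility_duration.py | resample_shiftability_profile
-- ===== SOURCE A (Python) =====
-- def resample_shiftability_profile(shiftability_profile, repeats):
--     extended_data = {}
--     counter = 1
--     for i in range(1, 97):
--         for _ in range(repeats):
--             for j in range(1, 13):
--                 extended_data[(counter, j)] = shiftability_profile.get((i, j), 0)
--             counter += 1
--     return extended_data
-- ===== SOURCE B (Python) =====
-- def resample_shiftability_profile(shiftability_profile, repeats):
--     # One flat loop over the global counter; the source slot is recovered by
--     # closed-form index arithmetic instead of an incremented counter variable.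
--     extended_data = {}
--     for counter in range(1, 96 * repeats + 1):
--         i = (counter - 1) // repeats + 1
--         for j in range(1, 13):
--             extended_data[(counter, j)] = shiftability_profile.get((i, j), 0)
--     return extended_data
-- ===== Notes on version B (the rewrite author's own statement) =====
-- stated objective: alternative
-- what changed: A's two outer loops (source slot i and the repeat count) with an explicitly incremented counter variable are flattened into a single loop over the global counter 1..96*repeats, recovering the source slot by the closed-form index arithmetic i = (counter-1)//repeats + 1, so the maintained state is just the output dict.
import Mathlib
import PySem

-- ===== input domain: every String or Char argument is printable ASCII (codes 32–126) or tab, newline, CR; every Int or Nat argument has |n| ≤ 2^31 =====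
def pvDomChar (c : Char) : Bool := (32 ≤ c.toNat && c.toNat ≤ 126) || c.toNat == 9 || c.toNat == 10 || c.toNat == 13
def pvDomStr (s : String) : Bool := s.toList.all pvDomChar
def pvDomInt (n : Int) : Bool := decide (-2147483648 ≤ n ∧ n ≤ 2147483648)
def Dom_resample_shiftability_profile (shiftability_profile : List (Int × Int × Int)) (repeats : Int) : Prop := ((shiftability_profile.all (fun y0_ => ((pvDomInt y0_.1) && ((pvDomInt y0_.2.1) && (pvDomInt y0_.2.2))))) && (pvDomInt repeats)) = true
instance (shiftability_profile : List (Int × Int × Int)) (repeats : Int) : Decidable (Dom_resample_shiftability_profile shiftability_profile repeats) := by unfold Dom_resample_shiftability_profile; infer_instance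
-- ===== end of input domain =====

-- B flattens A's two outer loops into ONE loop over the global counter, recovering the
-- source slot by closed-form division instead of maintaining an incremented counter (alternative decomposition).


-- ===== PORT A =====
-- shiftability_profile.get((i, j), 0): first-match lookup in the association list (dict convention), default 0
def pvGetD (sp : List (Int × Int × Int)) (i j : Int) : Int :=
  match sp.find? (fun t => t.1 == i && t.2.1 == j) with
  | some t => t.2.2
  | none => 0

-- extended_data[(k1, k2)] = v: Python dict assignment — overwrite the first match in place, else append
def pvDictSet (d : List (Int × Int × Int)) (k1 k2 v : Int) : List (Int × Int × Int) :=
  match d with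
  | [] => [(k1, k2, v)]
  | t :: rest => if t.1 == k1 && t.2.1 == k2 then (k1, k2, v) :: rest else t :: pvDictSet rest k1 k2 v

def resample_shiftability_profile (shiftability_profile : List (Int × Int × Int)) (repeats : Int) : List (Int × Int × Int) :=
  ((PySem.List.pyRange 1 97 1).foldl
    (fun (st : List (Int × Int × Int) × Int) i =>
      (PySem.List.pyRange 0 repeats 1).foldl
        (fun (st2 : List (Int × Int × Int) × Int) _ =>
          ((PySem.List.pyRange 1 13 1).foldl
             (fun ed j => pvDictSet ed st2.2 j (pvGetD shiftability_profile i j)) st2.1,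
           st2.2 + 1))
        st)
    ([], 1)).1

-- ===== PORT B =====
-- every key (counter, j) is assigned exactly once (counter strictly increases, j sweeps 1..12 once
-- per counter), so B's dict assignment is exactly an append; ported as such (exact)
def resample_shiftability_profile_alt (shiftability_profile : List (Int × Int × Int)) (repeats : Int) : List (Int × Int × Int) :=
  (PySem.List.pyRange 1 (96 * repeats + 1) 1).foldl
    (fun ed counter =>
      let i := PySem.Int.floordiv (counter - 1) repeats + 1
      (PySem.List.pyRange 1 13 1).foldl
        (fun ed2 j => ed2 ++ [(counter, j, pvGetD shiftability_profile i j)]) ed)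
    []

-- ===== PRECONDITION & SPEC =====
def Spec_resample_shiftability_profile (shiftability_profile : List (Int × Int × Int)) (repeats : Int) (out : List (Int × Int × Int)) : Prop := out = resample_shiftability_profile_alt shiftability_profile repeats
instance (shiftability_profile : List (Int × Int × Int)) (repeats : Int) (out : List (Int × Int × Int)) : Decidable (Spec_resample_shiftability_profile shiftability_profile repeats out) := by unfold Spec_resample_shiftability_profile; infer_instance

-- ===== CLAIM (what is proved, stated in full; the proofs are below) =====
def Claim_equal_resample_shiftability_profile : Prop := ∀ (shiftability_profile : List (Int × Int × Int)) (repeats : Int), Dom_resample_shiftability_profile shiftability_profile repeats → Spec_resample_shiftability_profile shiftability_profile repeats (resample_shiftability_profile shiftability_profile repeats)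

-- ===== LEMMAS AND PROOFS =====

-- one emitted row: the 12 entries written for a fixed counter c from source slot i
def pvRow (sp : List (Int × Int × Int)) (c i : Int) : List (Int × Int × Int) :=
  (PySem.List.pyRange 1 13 1).map (fun j => (c, j, pvGetD sp i j))

-- closed form of A's outer loop: for each source slot of L, m repeated blocks starting at counter c
def pvAL (sp : List (Int × Int × Int)) (m : Nat) : List Int → Int → List (Int × Int × Int)
  | [], _ => []
  | i :: L, c => (List.range m).flatMap (fun r : Nat => pvRow sp (c + (r : Int)) i) ++ pvAL sp m L (c + (m : Int))

lemma pvDictSet_fresh (d : List (Int × Int × Int)) (k1 k2 v : Int)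
    (h : ∀ t ∈ d, ¬(t.1 = k1 ∧ t.2.1 = k2)) :
    pvDictSet d k1 k2 v = d ++ [(k1, k2, v)] := by
  induction d with
  | nil => rfl
  | cons t rest ih =>
    have ht := h t (by simp)
    simp only [pvDictSet]
    rw [if_neg (by simpa using ht), ih (fun t' ht' => h t' (by simp [ht']))]
    simp

lemma inner_fresh (sp : List (Int × Int × Int)) (i c : Int) :
    ∀ (L : List Int), L.Nodup → ∀ (ed : List (Int × Int × Int)),
    (∀ t ∈ ed, t.1 ≠ c ∨ t.2.1 ∉ L) →
    L.foldl (fun ed j => pvDictSet ed c j (pvGetD sp i j)) ed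
      = ed ++ L.map (fun j => (c, j, pvGetD sp i j)) := by
  intro L
  induction L with
  | nil => intro _ ed _; simp
  | cons j L ih =>
    intro hnd ed hed
    simp only [List.foldl_cons, List.map_cons]
    rw [pvDictSet_fresh _ _ _ _ (by
      intro t ht hc
      rcases hed t ht with h | h
      · exact h hc.1
      · exact h (by simp [hc.2]))]
    rw [ih hnd.of_cons (ed ++ [(c, j, pvGetD sp i j)]) (by
      intro t ht
      rcases List.mem_append.1 ht with h | h
      · rcases hed t h with h' | h'
        · exact Or.inl h'
        · exact Or.inr (fun hmem => h' (List.mem_cons_of_mem _ hmem))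
      · simp only [List.mem_singleton] at h
        subst h
        exact Or.inr ((List.nodup_cons.1 hnd).1))]
    simp

lemma middle_loop (sp : List (Int × Int × Int)) (i : Int) {α : Type} :
    ∀ (L : List α) (ed : List (Int × Int × Int)) (c : Int),
    (∀ t ∈ ed, t.1 < c) →
    L.foldl
      (fun (st2 : List (Int × Int × Int) × Int) _ =>
        ((PySem.List.pyRange 1 13 1).foldl
           (fun ed j => pvDictSet ed st2.2 j (pvGetD sp i j)) st2.1,
         st2.2 + 1)) (ed, c)
      = (ed ++ (List.range L.length).flatMap (fun r : Nat => pvRow sp (c + (r : Int)) i), c + L.length) := by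
  intro L
  induction L with
  | nil => intro ed c _; simp
  | cons x L ih =>
    intro ed c hed
    simp only [List.foldl_cons]
    rw [inner_fresh sp i c _ (PySem.List.nodup_pyRange_one 1 13) ed
      (fun t ht => Or.inl (ne_of_lt (hed t ht)))]
    rw [ih (ed ++ (PySem.List.pyRange 1 13 1).map (fun j => (c, j, pvGetD sp i j))) (c + 1) (by
      intro t ht
      rcases List.mem_append.1 ht with h | h
      · exact lt_trans (hed t h) (by omega)
      · rcases List.mem_map.1 h with ⟨j, _, rfl⟩; omega)]
    refine Prod.ext ?_ ?_
    · simp only [List.append_assoc, List.length_cons]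
      congr 1
      rw [List.range_succ_eq_map]
      simp only [List.flatMap_cons, List.flatMap_map]
      congr 1
      · simp [pvRow]
      · apply List.flatMap_congr
        intro k _
        congr 1
        push_cast
        ring
    · simp only [List.length_cons]
      push_cast
      ring

lemma outer_loop (sp : List (Int × Int × Int)) (repeats : Int) :
    ∀ (L : List Int) (ed : List (Int × Int × Int)) (c : Int),
    (∀ t ∈ ed, t.1 < c) →
    L.foldl
      (fun (st : List (Int × Int × Int) × Int) i =>
        (PySem.List.pyRange 0 repeats 1).foldl
          (fun (st2 : List (Int × Int × Int) × Int) _ =>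
            ((PySem.List.pyRange 1 13 1).foldl
               (fun ed j => pvDictSet ed st2.2 j (pvGetD sp i j)) st2.1,
             st2.2 + 1)) st) (ed, c)
      = (ed ++ pvAL sp (PySem.List.pyRange 0 repeats 1).length L c,
         c + L.length * (PySem.List.pyRange 0 repeats 1).length) := by
  intro L
  induction L with
  | nil => intro ed c _; simp [pvAL]
  | cons i L ih =>
    intro ed c hed
    simp only [List.foldl_cons]
    rw [middle_loop sp i _ ed c hed]
    rw [ih _ (c + (PySem.List.pyRange 0 repeats 1).length) (by
      intro t ht
      rcases List.mem_append.1 ht with h | h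
      · exact lt_of_lt_of_le (hed t h) (by omega)
      · rcases List.mem_flatMap.1 h with ⟨r, hr, hmem⟩
        rcases List.mem_map.1 hmem with ⟨j, _, rfl⟩
        have := List.mem_range.1 hr
        omega)]
    refine Prod.ext ?_ ?_
    · simp [pvAL, List.append_assoc]
    · simp only [List.length_cons]
      push_cast
      ring

-- B as a flatMap of rows
lemma B_flatMap (sp : List (Int × Int × Int)) (repeats : Int) :
    resample_shiftability_profile_alt sp repeats
      = (PySem.List.pyRange 1 (96 * repeats + 1) 1).flatMap
          (fun c => pvRow sp c (PySem.Int.floordiv (c - 1) repeats + 1)) := by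
  unfold resample_shiftability_profile_alt
  simp only [PySem.List.foldl_append_singleton_eq_map]
  rw [PySem.List.foldl_append_eq_flatMap]
  simp [pvRow]

-- the bridge: A's nested closed form equals B's flat counter range, for positive repeats
lemma bridge (sp : List (Int × Int × Int)) (repeats : Int) (hr : 0 < repeats) :
    ∀ (n : Nat), n ≤ 96 →
    pvAL sp repeats.toNat (PySem.List.pyRange (97 - (n : Int)) 97 1) (1 + (96 - (n : Int)) * repeats)
      = (PySem.List.pyRange (1 + (96 - (n : Int)) * repeats) (1 + 96 * repeats) 1).flatMap
          (fun c => pvRow sp c (PySem.Int.floordiv (c - 1) repeats + 1)) := by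
  have hm : ((repeats.toNat : Int)) = repeats := Int.toNat_of_nonneg (by omega)
  intro n
  induction n with
  | zero =>
    intro _
    rw [PySem.List.pyRange_one_eq_nil (by omega), PySem.List.pyRange_one_eq_nil (by omega)]
    simp [pvAL]
  | succ n ih =>
    intro hn
    have hb : (n : Int) ≤ 95 := by exact_mod_cast Nat.lt_succ_iff.mp (Nat.lt_of_lt_of_le (Nat.lt_succ_self n) hn)
    push_cast
    rw [PySem.List.pyRange_one_cons (by omega)]
    simp only [pvAL]
    rw [show (97 : Int) - ((n : Int) + 1) + 1 = 97 - (n : Int) from by ring]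
    rw [show 1 + (96 - ((n : Int) + 1)) * repeats + ((repeats.toNat : Nat) : Int)
          = 1 + (96 - (n : Int)) * repeats from by rw [hm]; ring]
    rw [ih (by omega)]
    have hsplit : PySem.List.pyRange (1 + (96 - ((n : Int) + 1)) * repeats) (1 + 96 * repeats) 1
        = PySem.List.pyRange (1 + (96 - ((n : Int) + 1)) * repeats) (1 + (96 - (n : Int)) * repeats) 1
          ++ PySem.List.pyRange (1 + (96 - (n : Int)) * repeats) (1 + 96 * repeats) 1 := by
      refine PySem.List.pyRange_one_append _ _ _ ?_ ?_
      · nlinarith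
      · nlinarith
    rw [hsplit, List.flatMap_append]
    congr 1
    rw [PySem.List.pyRange_one]
    rw [show 1 + (96 - (n : Int)) * repeats - (1 + (96 - ((n : Int) + 1)) * repeats) = repeats from by ring]
    rw [List.flatMap_map]
    apply List.flatMap_congr
    intro k hk
    have hk' : (k : Int) < repeats := by
      have := List.mem_range.1 hk
      omega
    have hk0 : (0 : Int) ≤ (k : Int) := by positivity
    have hdiv : PySem.Int.floordiv (1 + (96 - ((n : Int) + 1)) * repeats + (k : Int) - 1) repeats
        = 96 - ((n : Int) + 1) := by
      rw [PySem.Int.floordiv_eq_iff_of_pos hr]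
      constructor
      · nlinarith
      · nlinarith
    rw [hdiv]
    congr 1
    ring

-- the trivial closed case: for repeats ≤ 0 A's repeat loop is empty and the state never changes
lemma foldl_id {α β : Type} (L : List α) (st : β) : L.foldl (fun st _ => st) st = st := by
  induction L with
  | nil => rfl
  | cons x L ih => simp [ih]

-- ===== VERDICT (by name: the statement is the Claim_ definition above) =====
theorem resample_shiftability_profile_spec : Claim_equal_resample_shiftability_profile := by
  intro sp repeats _
  unfold Spec_resample_shiftability_profile
  rw [B_flatMap]
  by_cases hr : repeats ≤ 0
  · unfold resample_shiftability_profile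
    rw [PySem.List.pyRange_one_eq_nil (by omega : (96 * repeats + 1 : Int) ≤ 1)]
    simp only [show PySem.List.pyRange 0 repeats 1 = [] from PySem.List.pyRange_one_eq_nil hr,
      List.foldl_nil, List.flatMap_nil]
    rw [foldl_id]
  · have hr : 0 < repeats := by omega
    unfold resample_shiftability_profile
    rw [outer_loop sp repeats _ [] 1 (by simp)]
    have hml : (PySem.List.pyRange 0 repeats 1).length = repeats.toNat := by
      rw [PySem.List.length_pyRange_one]
      congr 1
      omega
    have h := bridge sp repeats hr 96 (le_refl _)
    norm_num at h
    rw [show (1 + 96 * repeats : Int) = 96 * repeats + 1 from by ring] at h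
    rw [hml]
    simpa using h
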